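-- pv_equiv track=rewrite | github.com/mthomas46/jirassic_pack | jirassicpack/analytics/helpers.py | build_report_sections
-- ===== SOURCE A (Python) =====
-- def build_report_sections(sections: dict) -> str:
--     """
--     Build a Markdown report from a dict of named sections. Only includes sections that are present.
--     Args:
--         sections (dict): Keys are section names (header, toc, summary, action_items, top_n, breakdowns, grouped_sections, metadata, glossary, next_steps, etc.), values are Markdown strings.
--     Returns:
--         str: Full Markdown report.
--     """
--     order = [
--         'header',
--         'toc',
--         'summary',
--         'action_items',
--         'top_n',
--         'breakdowns',
--         'related_links',
--         'grouped_sections',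
--         'next_steps',
--         'metadata',
--         'glossary',
--     ]
--     out = []
--     for key in order:
--         val = sections.get(key)
--         if val:
--             out.append(val.strip())
--     # Add any extra sections not in the default order
--     for key, val in sections.items():
--         if key not in order and val:
--             out.append(val.strip())
--     return '\n\n---\n\n'.join(out)
-- ===== SOURCE B (Python) =====
-- def build_report_sections(sections: dict) -> str:
--     """
--     Build a Markdown report from a dict of named sections. Only includes sections that are present.
--     Single pass: bucket each truthy section by the rank of its name (extras share the sentinel
--     rank len(order), preserving their insertion order), then emit buckets in rank order.
--     """
--     order = [
--         'header',
--         'toc',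
--         'summary',
--         'action_items',
--         'top_n',
--         'breakdowns',
--         'related_links',
--         'grouped_sections',
--         'next_steps',
--         'metadata',
--         'glossary',
--     ]
--     rank = {name: i for i, name in enumerate(order)}
--     buckets = {}
--     for key, val in sections.items():
--         if val:
--             buckets.setdefault(rank.get(key, len(order)), []).append(val.strip())
--     return '\n\n---\n\n'.join(s for r in range(len(order) + 1) for s in buckets.get(r, []))
-- ===== Notes on version B (the rewrite author's own statement) =====
-- stated objective: alternative
-- what changed: Replaces A's two passes (eleven ordered dict lookups, then a membership-scan over the items) with a single pass that buckets each truthy section under the rank of its name via a precomputed rank dict, then emits buckets in rank order.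
import Mathlib
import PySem

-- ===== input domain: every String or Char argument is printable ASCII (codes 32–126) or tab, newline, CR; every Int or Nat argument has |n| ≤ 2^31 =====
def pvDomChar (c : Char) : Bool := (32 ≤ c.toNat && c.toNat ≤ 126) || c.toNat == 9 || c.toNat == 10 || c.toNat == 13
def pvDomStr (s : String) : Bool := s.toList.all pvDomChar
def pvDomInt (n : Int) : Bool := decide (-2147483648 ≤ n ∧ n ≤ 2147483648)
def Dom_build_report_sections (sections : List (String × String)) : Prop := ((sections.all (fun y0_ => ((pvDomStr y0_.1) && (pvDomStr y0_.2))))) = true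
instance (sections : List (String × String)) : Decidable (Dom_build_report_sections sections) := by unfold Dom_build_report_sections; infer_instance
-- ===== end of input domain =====

-- B replaces A's eleven ordered lookups plus membership-scan pass by a single pass that buckets
-- each truthy section under the rank of its name (alternative decomposition; same asymptotic cost).


-- ===== PORT A =====
def pvOrder : List String :=
  ["header", "toc", "summary", "action_items", "top_n", "breakdowns",
   "related_links", "grouped_sections", "next_steps", "metadata", "glossary"]

def build_report_sections (sections : List (String × String)) : String :=
  let d : PySem.Dict String String := PySem.Dict.mk sections
  let out : List String := pvOrder.foldl (fun out key =>
    match d.get? key with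
    | some val => if val ≠ "" then out ++ [PySem.Str.strip val] else out
    | none => out) []
  let out := sections.foldl (fun out kv =>
    if kv.1 ∉ pvOrder ∧ kv.2 ≠ "" then out ++ [PySem.Str.strip kv.2] else out) out
  PySem.Str.join "\n\n---\n\n" out

-- ===== PORT B =====
def build_report_sections_alt (sections : List (String × String)) : String :=
  let rank : PySem.Dict String Int :=
    (PySem.List.enumerate pvOrder).foldl (fun r p => r.insert p.2 p.1) PySem.Dict.empty
  let buckets : PySem.Dict Int (List String) :=
    sections.foldl (fun b kv =>
      if kv.2 ≠ "" then
        b.modify (rank.getD kv.1 (pvOrder.length : Int)) [] (· ++ [PySem.Str.strip kv.2])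
      else b) PySem.Dict.empty
  PySem.Str.join "\n\n---\n\n"
    ((PySem.List.pyRange 0 ((pvOrder.length : Int) + 1) 1).flatMap (fun r => buckets.getD r []))

-- ===== PRECONDITION & SPEC =====
-- Pre_ excludes association lists with duplicate keys: they do not represent any Python dict
-- (a Python dict's keys are unique), so A's behaviour there is not defined by the source.
def Pre_build_report_sections (sections : List (String × String)) : Prop :=
  (sections.map Prod.fst).Nodup
instance (sections : List (String × String)) : Decidable (Pre_build_report_sections sections) := by
  unfold Pre_build_report_sections; infer_instance

def pvWitness_build_report_sections : (List (String × String)) :=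
  [("header", " # Report "), ("extra", "tail"), ("toc", "")]

def Spec_build_report_sections (sections : List (String × String)) (out : String) : Prop :=
  out = build_report_sections_alt sections
instance (sections : List (String × String)) (out : String) :
    Decidable (Spec_build_report_sections sections out) := by
  unfold Spec_build_report_sections; infer_instance

-- ===== CLAIM (what is proved, stated in full; the proofs are below) =====
def Claim_equal_build_report_sections : Prop :=
  ∀ (sections : List (String × String)), Dom_build_report_sections sections →
    Pre_build_report_sections sections →
    Spec_build_report_sections sections (build_report_sections sections)

-- ===== LEMMAS AND PROOFS =====

-- helper definitions used only by the proofs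
def pvContrib (sections : List (String × String)) (key : String) : List String :=
  match (PySem.Dict.mk sections).get? key with
  | some val => if val ≠ "" then [PySem.Str.strip val] else []
  | none => []

def pvRankDict : PySem.Dict String Int :=
  (PySem.List.enumerate pvOrder).foldl (fun r p => r.insert p.2 p.1) PySem.Dict.empty

def pvRk (k : String) : Int := pvRankDict.getD k (pvOrder.length : Int)

theorem pvRk_known (key : String) (r : Int)
    (h1 : pvRankDict.get? key = some r)
    (h2 : ∀ p ∈ pvRankDict.items, p.2 = r → p.1 = key)
    (h3 : ¬ ((pvOrder.length : Int) = r)) :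
    ∀ k, pvRk k = r ↔ k = key := by
  intro k
  constructor
  · intro hk
    rw [pvRk, PySem.Dict.getD_eq_get?_getD] at hk
    cases hg : pvRankDict.get? k with
    | none => rw [hg] at hk; exact absurd hk h3
    | some i =>
      rw [hg] at hk
      exact h2 (k, i) (PySem.Dict.mem_items_of_get?_eq_some _ hg) hk
  · intro hk
    subst hk
    rw [pvRk, PySem.Dict.getD_eq_get?_getD, h1]
    rfl

theorem pvRk_extra : ∀ k, pvRk k = (pvOrder.length : Int) ↔ k ∉ pvOrder := by
  intro k
  have hkeys : pvRankDict.keys = pvOrder := by decide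
  constructor
  · intro hk hmem
    rw [pvRk, PySem.Dict.getD_eq_get?_getD] at hk
    cases hg : pvRankDict.get? k with
    | some i =>
      rw [hg] at hk
      have hin : (k, i) ∈ pvRankDict.items := PySem.Dict.mem_items_of_get?_eq_some _ hg
      have hne : ∀ p ∈ pvRankDict.items, ¬ (p.2 = (pvOrder.length : Int)) := by decide
      exact hne (k, i) hin hk
    | none =>
      rw [PySem.Dict.get?_eq_none_iff_not_mem_keys, hkeys] at hg
      exact hg hmem
  · intro hmem
    rw [pvRk, PySem.Dict.getD_eq_get?_getD]
    cases hg : pvRankDict.get? k with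
    | none => rfl
    | some i =>
      exfalso
      apply hmem
      rw [← hkeys]
      exact PySem.Dict.mem_keys_of_mem_items _ (PySem.Dict.mem_items_of_get?_eq_some _ hg)

-- a Prop-ite loop appending a singleton is filter + map
theorem pv_foldl_ite_append {a : Type} (p : a → Prop) [DecidablePred p] (f : a → String)
    (l : List a) (acc : List String) :
    l.foldl (fun out x => if p x then out ++ [f x] else out) acc
      = acc ++ (l.filter (fun x => decide (p x))).map f := by
  induction l generalizing acc with
  | nil => simp
  | cons x t ih => by_cases h : p x <;> simp [h, ih]

-- a Prop-ite guarded fold is a fold over the filtered list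
theorem pv_foldl_ite_filter {a b : Type} (p : a → Prop) [DecidablePred p]
    (g : b → a → b) (l : List a) (init : b) :
    l.foldl (fun acc x => if p x then g acc x else acc) init
      = (l.filter (fun x => decide (p x))).foldl g init := by
  induction l generalizing init with
  | nil => rfl
  | cons x t ih => by_cases h : p x <;> simp [h, ih]

-- with unique keys, filtering for one key realises the dict lookup
theorem pv_filter_key_contrib (sections : List (String × String))
    (h : (sections.map Prod.fst).Nodup) (key : String) :
    ((sections.filter (fun kv => kv.1 == key && decide (kv.2 ≠ ""))).map
        (fun kv => PySem.Str.strip kv.2)) = pvContrib sections key := by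
  induction sections with
  | nil => rfl
  | cons kv t ih =>
    simp only [List.map_cons, List.nodup_cons] at h
    by_cases hk : kv.1 = key
    · subst hk
      rw [pvContrib, PySem.Dict.get?_mk_cons]
      simp only [BEq.rfl, if_true]
      by_cases he : kv.2 = "" <;>
        simp [he] <;>
        · intro a b hab ha
          subst ha
          exact absurd (List.mem_map.mpr ⟨(kv.1, b), hab, rfl⟩) h.1
    · have hb : (kv.1 == key) = false := by simp [hk]
      rw [pvContrib, PySem.Dict.get?_mk_cons, if_neg (by simp [hk])]
      simp only [List.filter_cons, hb, Bool.false_and]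
      exact ih h.2

theorem pv_A_eq (sections : List (String × String)) :
    build_report_sections sections = PySem.Str.join "\n\n---\n\n"
      (pvOrder.flatMap (pvContrib sections)
        ++ (sections.filter (fun kv => decide (kv.1 ∉ pvOrder) && decide (kv.2 ≠ ""))).map
             (fun kv => PySem.Str.strip kv.2)) := by
  rw [build_report_sections]
  have h1 : (fun (out : List String) (key : String) =>
      match (PySem.Dict.mk sections).get? key with
      | some val => if val ≠ "" then out ++ [PySem.Str.strip val] else out
      | none => out)
      = fun out key => out ++ pvContrib sections key := by
    funext out key
    rw [pvContrib]
    cases (PySem.Dict.mk sections).get? key with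
    | none => simp
    | some val => by_cases hv : val = "" <;> simp [hv]
  rw [h1, PySem.List.foldl_append_eq_flatMap, List.nil_append,
      pv_foldl_ite_append (fun kv : String × String => kv.1 ∉ pvOrder ∧ kv.2 ≠ "")
        (fun kv => PySem.Str.strip kv.2) sections]
  congr 2
  congr 1
  apply List.filter_congr
  intro kv _
  simp

theorem pv_bucket (sections : List (String × String)) (r : Int) :
    (sections.foldl (fun b kv =>
        if kv.2 ≠ "" then
          b.modify (pvRk kv.1) [] (fun c => c ++ [PySem.Str.strip kv.2])
        else b) PySem.Dict.empty).getD r []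
      = (sections.filter (fun kv => decide (kv.2 ≠ "") && (pvRk kv.1 == r))).map
          (fun kv => PySem.Str.strip kv.2) := by
  rw [pv_foldl_ite_filter (fun kv : String × String => kv.2 ≠ "")]
  have hmap : ((sections.filter (fun kv => decide (kv.2 ≠ ""))).foldl
      (fun b kv => b.modify (pvRk kv.1) [] (fun c => c ++ [PySem.Str.strip kv.2]))
      PySem.Dict.empty)
      = (((sections.filter (fun kv => decide (kv.2 ≠ ""))).map
          (fun kv => (pvRk kv.1, PySem.Str.strip kv.2))).foldl
            (fun d p => d.modify p.1 [] (fun c => c ++ [p.2])) PySem.Dict.empty) := by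
    rw [List.foldl_map]
  rw [hmap, PySem.Dict.getD_foldl_modify_append, PySem.Dict.getD_empty, List.nil_append,
      List.filter_map, List.map_map]
  show ((sections.filter (fun kv => decide (kv.2 ≠ ""))).filter
      (fun kv => pvRk kv.1 == r)).map (fun kv => PySem.Str.strip kv.2) = _
  rw [List.filter_filter]
  congr 1
  apply List.filter_congr
  intro kv _
  rw [Bool.and_comm]

theorem pv_B_eq (sections : List (String × String)) :
    build_report_sections_alt sections = PySem.Str.join "\n\n---\n\n"
      (([0, 1, 2, 3, 4, 5, 6, 7, 8, 9, 10, 11] : List Int).flatMap (fun r =>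
        (sections.filter (fun kv => decide (kv.2 ≠ "") && (pvRk kv.1 == r))).map
          (fun kv => PySem.Str.strip kv.2))) := by
  have h0 : build_report_sections_alt sections = PySem.Str.join "\n\n---\n\n"
      ((PySem.List.pyRange 0 ((pvOrder.length : Int) + 1) 1).flatMap (fun r =>
        (sections.foldl (fun b kv =>
          if kv.2 ≠ "" then
            b.modify (pvRk kv.1) [] (fun c => c ++ [PySem.Str.strip kv.2])
          else b) PySem.Dict.empty).getD r [])) := rfl
  have hrange : PySem.List.pyRange 0 ((pvOrder.length : Int) + 1) 1
      = ([0, 1, 2, 3, 4, 5, 6, 7, 8, 9, 10, 11] : List Int) := by decide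
  rw [h0, hrange]
  simp only [pv_bucket]

-- one bucket of a key with rank r is A's contribution for that key
theorem pv_bucket_known (sections : List (String × String))
    (h : (sections.map Prod.fst).Nodup) (key : String) (r : Int)
    (hiff : ∀ k, pvRk k = r ↔ k = key) :
    (sections.filter (fun kv => decide (kv.2 ≠ "") && (pvRk kv.1 == r))).map
        (fun kv => PySem.Str.strip kv.2) = pvContrib sections key := by
  rw [← pv_filter_key_contrib sections h key]
  congr 1
  apply List.filter_congr
  intro kv _
  have : (pvRk kv.1 == r) = (kv.1 == key) := by
    apply Bool.eq_iff_iff.mpr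
    simp only [beq_iff_eq]
    exact hiff kv.1
  rw [this, Bool.and_comm]

-- ===== VERDICT (by name: the statement is the Claim_ definition above) =====
theorem build_report_sections_spec : Claim_equal_build_report_sections := by
  intro sections _ hpre
  unfold Spec_build_report_sections
  rw [pv_A_eq, pv_B_eq]
  congr 1
  have hlen : ((pvOrder.length : Int)) = 11 := by decide
  have hextra : (sections.filter (fun kv => decide (kv.2 ≠ "") && (pvRk kv.1 == (11 : Int)))).map
      (fun kv => PySem.Str.strip kv.2)
      = (sections.filter (fun kv => decide (kv.1 ∉ pvOrder) && decide (kv.2 ≠ ""))).map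
          (fun kv => PySem.Str.strip kv.2) := by
    congr 1
    apply List.filter_congr
    intro kv _
    have : (pvRk kv.1 == (11 : Int)) = decide (kv.1 ∉ pvOrder) := by
      apply Bool.eq_iff_iff.mpr
      simp only [beq_iff_eq, decide_eq_true_eq]
      rw [← hlen]
      exact pvRk_extra kv.1
    rw [this, Bool.and_comm]
  simp only [List.flatMap_cons, List.flatMap_nil, List.append_nil]
  rw [pv_bucket_known sections hpre "header" 0
        (pvRk_known "header" 0 (by decide) (by decide) (by decide)),
      pv_bucket_known sections hpre "toc" 1
        (pvRk_known "toc" 1 (by decide) (by decide) (by decide)),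
      pv_bucket_known sections hpre "summary" 2
        (pvRk_known "summary" 2 (by decide) (by decide) (by decide)),
      pv_bucket_known sections hpre "action_items" 3
        (pvRk_known "action_items" 3 (by decide) (by decide) (by decide)),
      pv_bucket_known sections hpre "top_n" 4
        (pvRk_known "top_n" 4 (by decide) (by decide) (by decide)),
      pv_bucket_known sections hpre "breakdowns" 5
        (pvRk_known "breakdowns" 5 (by decide) (by decide) (by decide)),
      pv_bucket_known sections hpre "related_links" 6
        (pvRk_known "related_links" 6 (by decide) (by decide) (by decide)),
      pv_bucket_known sections hpre "grouped_sections" 7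
        (pvRk_known "grouped_sections" 7 (by decide) (by decide) (by decide)),
      pv_bucket_known sections hpre "next_steps" 8
        (pvRk_known "next_steps" 8 (by decide) (by decide) (by decide)),
      pv_bucket_known sections hpre "metadata" 9
        (pvRk_known "metadata" 9 (by decide) (by decide) (by decide)),
      pv_bucket_known sections hpre "glossary" 10
        (pvRk_known "glossary" 10 (by decide) (by decide) (by decide)),
      hextra]
  simp [pvOrder, List.append_assoc]
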